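-- pv_equiv track=rewrite | github.com/drizztSun/common_project | PythonLeetcode/Leetcode/1203_SortItemsByGroupsRespectingDependencies.py | doit_topsort
-- ===== SOURCE A (Python) =====
-- from collections import deque, defaultdict
-- from heapq import heappush, heappop
--
-- def doit_topsort(n: int, m: int, group: list, beforeItems: list) -> list:
--     #
--     for i in range(len(group)):
--         if group[i] == -1:
--             group[i] = m
--             m += 1
--
--     groupgraph, itemgraph = [[] for _ in range(m)], [[] for _ in range(n)]
--     groupindegree, itemindegree = [0] * m, [0] * n
--
--     for d in range(n):
--         for c in beforeItems[d]:
--             itemgraph[c].append(d)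
--             itemindegree[d] += 1
--             if group[d] == group[c]:
--                 continue
--             groupgraph[group[c]].append(group[d])
--             groupindegree[group[d]] += 1
--
--     groupqueue = deque([i for i in range(m) if groupindegree[i] == 0])
--     grouporder = {}
--     order = 0
--     while groupqueue:
--         c = groupqueue.popleft()
--         grouporder[c] = order
--         order += 1
--         for nc in groupgraph[c]:
--             groupindegree[nc] -= 1
--             if groupindegree[nc] == 0:
--                 groupqueue.append(nc)
--
--
--     if len(grouporder) < m:
--         return []
--
--     itemqueue, order = [], 0
--     for i in range(n):
--         if itemindegree[i] == 0:
--             heappush(itemqueue, (grouporder[group[i]], order, i))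
--             order += 1
--
--     res = []
--     while itemqueue:
--
--         c = heappop(itemqueue)
--         res.append(c[2])
--
--         for nc in itemgraph[c[2]]:
--
--             itemindegree[nc] -= 1
--             if itemindegree[nc] == 0:
--                 heappush(itemqueue, (grouporder[group[nc]], order, nc))
--                 order += 1
--
--     return res if len(res) == n else []
-- ===== SOURCE B (Python) =====
-- from collections import deque
--
--
-- def doit_topsort(n: int, m: int, group: list, beforeItems: list) -> list:
--     # same remapping of -1 groups as the original (mutates `group` in place, like it)
--     for i in range(len(group)):
--         if group[i] == -1:
--             group[i] = m
--             m += 1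
--
--     groupgraph, itemgraph = [[] for _ in range(m)], [[] for _ in range(n)]
--     groupindegree, itemindegree = [0] * m, [0] * n
--
--     for d in range(n):
--         for c in beforeItems[d]:
--             itemgraph[c].append(d)
--             itemindegree[d] += 1
--             if group[d] == group[c]:
--                 continue
--             groupgraph[group[c]].append(group[d])
--             groupindegree[group[d]] += 1
--
--     groupqueue = deque([i for i in range(m) if groupindegree[i] == 0])
--     grouporder = {}
--     order = 0
--     while groupqueue:
--         c = groupqueue.popleft()
--         grouporder[c] = order
--         order += 1
--         for nc in groupgraph[c]:
--             groupindegree[nc] -= 1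
--             if groupindegree[nc] == 0:
--                 groupqueue.append(nc)
--
--     if len(grouporder) < m:
--         return []
--
--     # Scheduling: instead of a global min-heap keyed by (group rank, push counter, item),
--     # keep one FIFO bucket per group rank and drain them behind a frontier pointer
--     # (pulled back if a push ever lands on an earlier rank).
--     buckets = [None] * order          # per-rank FIFO, created lazily (None = still empty)
--     for i in range(n):
--         if itemindegree[i] == 0:
--             b = grouporder[group[i]]
--             if buckets[b] is None:
--                 buckets[b] = deque()
--             buckets[b].append(i)
--
--     res = []
--     p = 0
--     while True:
--         while p < order and not buckets[p]:
--             p += 1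
--         if p == order:
--             break
--         i = buckets[p].popleft()
--         res.append(i)
--         for nc in itemgraph[i]:
--             itemindegree[nc] -= 1
--             if itemindegree[nc] == 0:
--                 b = grouporder[group[nc]]
--                 if buckets[b] is None:
--                     buckets[b] = deque()
--                 buckets[b].append(nc)
--                 if b < p:
--                     p = b
--
--     return res if len(res) == n else []
-- ===== Notes on version B (the rewrite author's own statement) =====
-- stated objective: alternative
-- what changed: The min-heap of (group rank, global push counter, item) triples is replaced by one FIFO bucket per group rank drained behind an advancing frontier pointer (pulled back when a push lands on an earlier rank), eliminating the heap and the tie-break counter; the preprocessing phases (group remap, graph build, group Kahn pass) are kept unchanged.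
-- outside the precondition, e.g. on doit_topsort(2, 1, [0, 0], [[-1], []]): A returns [1, 0], B returns [1, 0]
import Mathlib
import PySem

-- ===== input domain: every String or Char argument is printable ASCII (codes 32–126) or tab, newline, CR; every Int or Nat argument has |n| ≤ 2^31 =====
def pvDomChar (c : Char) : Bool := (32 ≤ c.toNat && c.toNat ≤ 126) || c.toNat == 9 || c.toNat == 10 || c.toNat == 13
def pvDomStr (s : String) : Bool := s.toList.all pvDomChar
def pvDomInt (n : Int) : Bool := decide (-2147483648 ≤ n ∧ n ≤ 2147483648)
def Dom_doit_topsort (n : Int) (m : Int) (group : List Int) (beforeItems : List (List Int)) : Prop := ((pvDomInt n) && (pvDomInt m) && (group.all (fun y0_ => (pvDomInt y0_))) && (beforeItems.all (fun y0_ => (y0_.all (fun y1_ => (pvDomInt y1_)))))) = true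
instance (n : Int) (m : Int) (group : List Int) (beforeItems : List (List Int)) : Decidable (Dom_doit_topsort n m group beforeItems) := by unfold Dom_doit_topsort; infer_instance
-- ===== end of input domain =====

-- B replaces A's min-heap item scheduling by per-group-rank FIFO buckets behind a frontier
-- pointer; the preprocessing phases are shared verbatim by both Python versions (and both
-- mutate `group` in place identically); the theorems are about the return value.

-- ===== PORT A =====
-- Indexing helpers, exact for the nonnegative in-range indices Pre_ admits.
-- (Source B keeps the preprocessing phases of Source A verbatim, so both ports share
-- pvRemap/pvBuild/pvKahn/pvPrep below.)
def pvGetL (xs : List (List Int)) (i : Int) : List Int := PySem.List.pyGetD xs i []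
def pvGetI (xs : List Int) (i : Int) : Int := PySem.List.pyGetD xs i 0
def pvSetL (xs : List (List Int)) (i : Int) (v : List Int) : List (List Int) := xs.set i.toNat v
def pvSetI (xs : List Int) (i : Int) (v : Int) : List Int := xs.set i.toNat v

-- `for i in range(len(group)): if group[i] == -1: group[i] = m; m += 1`
-- (the loop touches exactly position i, so it is ported element by element)
def pvRemap : List Int → Int → List Int × Int
  | [], m => ([], m)
  | g :: t, m =>
    if g = -1 then
      let r := pvRemap t (m + 1)
      (m :: r.1, r.2)
    else
      let r := pvRemap t m
      (g :: r.1, r.2)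

-- one step `for c in beforeItems[d]` of the graph-building loop;
-- state = (itemgraph, itemindegree, groupgraph, groupindegree)
def pvEdge (grp : List Int) (st : List (List Int) × List Int × List (List Int) × List Int)
    (d c : Int) : List (List Int) × List Int × List (List Int) × List Int :=
  let ig := pvSetL st.1 c (pvGetL st.1 c ++ [d])
  let iin := pvSetI st.2.1 d (pvGetI st.2.1 d + 1)
  if pvGetI grp d = pvGetI grp c then
    (ig, iin, st.2.2.1, st.2.2.2)
  else
    (ig, iin,
     pvSetL st.2.2.1 (pvGetI grp c) (pvGetL st.2.2.1 (pvGetI grp c) ++ [pvGetI grp d]),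
     pvSetI st.2.2.2 (pvGetI grp d) (pvGetI st.2.2.2 (pvGetI grp d) + 1))

def pvBuild (n : Int) (grp : List Int) (bi : List (List Int)) (mm : Int) :
    List (List Int) × List Int × List (List Int) × List Int :=
  (PySem.List.pyRange 0 n).foldl
    (fun st d => (PySem.List.pyGetD bi d []).foldl (fun st c => pvEdge grp st d c) st)
    (List.replicate n.toNat [], List.replicate n.toNat 0,
     List.replicate mm.toNat [], List.replicate mm.toNat 0)

def pvEdgeCount (xss : List (List Int)) : Nat := xss.foldl (fun a l => a + l.length) 0

-- `while groupqueue:` Kahn pass over the group graph; the fuel bound mm + |edges| + 1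
-- is never reached (each group is enqueued at most once, pushes ≤ decrements ≤ |edges|)
def pvKahn (gg : List (List Int)) :
    Nat → List Int → PySem.Dict Int Int → Int → List Int → PySem.Dict Int Int × Int
  | 0, _, go, ord, _ => (go, ord)
  | _ + 1, [], go, ord, _ => (go, ord)
  | fuel + 1, c :: q, go, ord, gin =>
    let st := (pvGetL gg c).foldl
      (fun (s : List Int × List Int) nc =>
        let gin' := pvSetI s.2 nc (pvGetI s.2 nc - 1)
        if pvGetI gin' nc = 0 then (s.1 ++ [nc], gin') else (s.1, gin'))
      (q, gin)
    pvKahn gg fuel st.1 (go.insert c ord) (ord + 1) st.2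

-- the three preprocessing phases (identical in Source A and Source B):
-- returns (group after remap, m after remap, itemgraph, itemindegree, grouporder, order)
def pvPrep (n m : Int) (group : List Int) (bi : List (List Int)) :
    List Int × Int × List (List Int) × List Int × PySem.Dict Int Int × Int :=
  let r := pvRemap group m
  let st := pvBuild n r.1 bi r.2
  let kr := pvKahn st.2.2.1 (r.2.toNat + pvEdgeCount st.2.2.1 + 1)
    ((PySem.List.pyRange 0 r.2).filter (fun g => decide (pvGetI st.2.2.2 g = 0)))
    PySem.Dict.empty 0 st.2.2.2
  (r.1, r.2, st.1, st.2.1, kr.1, kr.2)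

-- heapq modelled by its contract: heappop removes the least triple (the triples are
-- pairwise distinct here because their middle component is a fresh counter value)
def pvTripLe (a b : Int × Int × Int) : Bool :=
  decide (a.1 < b.1 ∨ (a.1 = b.1 ∧ (a.2.1 < b.2.1 ∨ (a.2.1 = b.2.1 ∧ a.2.2 ≤ b.2.2))))

def pvHeapPop : List (Int × Int × Int) → (Int × Int × Int) × List (Int × Int × Int)
  | [] => ((0, 0, 0), [])
  | [t] => (t, [])
  | t :: u :: rest =>
    let r := pvHeapPop (u :: rest)
    if pvTripLe t r.1 then (t, u :: rest) else (r.1, t :: r.2)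

-- `if itemindegree[i] == 0: heappush(itemqueue, (grouporder[group[i]], order, i)); order += 1`
def pvSeedA (key : Int → Int) (iin : List Int) (s : List (Int × Int × Int) × Int) (i : Int) :
    List (Int × Int × Int) × Int :=
  if pvGetI iin i = 0 then (s.1 ++ [(key i, s.2, i)], s.2 + 1) else s

-- inner `for nc in itemgraph[c[2]]` step; state = (heap, itemindegree, order)
def pvStepA (key : Int → Int) (s : List (Int × Int × Int) × List Int × Int) (nc : Int) :
    List (Int × Int × Int) × List Int × Int :=
  let iin' := pvSetI s.2.1 nc (pvGetI s.2.1 nc - 1)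
  if pvGetI iin' nc = 0 then (s.1 ++ [(key nc, s.2.2, nc)], iin', s.2.2 + 1)
  else (s.1, iin', s.2.2)

-- `while itemqueue:` (fuel n + |edges| + 1 is never reached: pops ≤ seeds + pushes)
def pvDrainA (ig : List (List Int)) (key : Int → Int) :
    Nat → List (Int × Int × Int) → List Int → List Int → Int → List Int
  | 0, _, _, res, _ => res
  | _ + 1, [], _, res, _ => res
  | fuel + 1, a :: h, iin, res, ord =>
    let pr := pvHeapPop (a :: h)
    let st := (pvGetL ig pr.1.2.2).foldl (pvStepA key) (pr.2, iin, ord)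
    pvDrainA ig key fuel st.1 st.2.1 (res ++ [pr.1.2.2]) st.2.2

def doit_topsort (n : Int) (m : Int) (group : List Int) (beforeItems : List (List Int)) : List Int :=
  let P := pvPrep n m group beforeItems
  let grp := P.1
  let mm := P.2.1
  let ig := P.2.2.1
  let iin := P.2.2.2.1
  let go := P.2.2.2.2.1
  if (go.size : Int) < mm then []
  else
    let key := fun i => go.getD (pvGetI grp i) 0
    let seed := (PySem.List.pyRange 0 n).foldl (pvSeedA key iin) ([], 0)
    let res := pvDrainA ig key (n.toNat + pvEdgeCount ig + 1) seed.1 iin [] seed.2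
    if (res.length : Int) = n then res else []

-- ===== PORT B =====
-- Source B: same phases via pvPrep, then FIFO buckets per group rank instead of the heap
-- (a bucket Source B has not yet materialised, i.e. None, is the empty FIFO: both are []).
def pvSeedB (key : Int → Int) (iin : List Int) (bs : List (List Int)) (i : Int) : List (List Int) :=
  if pvGetI iin i = 0 then pvSetL bs (key i) (pvGetL bs (key i) ++ [i]) else bs

-- inner `for nc in itemgraph[i]` step; state = (buckets, itemindegree, frontier p)
def pvStepB (key : Int → Int) (s : List (List Int) × List Int × Int) (nc : Int) :
    List (List Int) × List Int × Int :=
  let iin' := pvSetI s.2.1 nc (pvGetI s.2.1 nc - 1)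
  if pvGetI iin' nc = 0 then
    (pvSetL s.1 (key nc) (pvGetL s.1 (key nc) ++ [nc]), iin',
     if key nc < s.2.2 then key nc else s.2.2)
  else (s.1, iin', s.2.2)

-- `while p < order and not buckets[p]: p += 1`
def pvAdvance (buckets : List (List Int)) (kk p : Int) : Int :=
  if _h : p < kk then
    if pvGetL buckets p = [] then pvAdvance buckets kk (p + 1) else p
  else p
termination_by (kk - p).toNat
decreasing_by omega

-- `while True:` outer loop of Source B (same fuel bound as pvDrainA)
def pvDrainB (ig : List (List Int)) (key : Int → Int) (kk : Int) :
    Nat → List (List Int) → List Int → List Int → Int → List Int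
  | 0, _, _, res, _ => res
  | fuel + 1, buckets, iin, res, p =>
    let p1 := pvAdvance buckets kk p
    if p1 < kk then
      let bk := pvGetL buckets p1
      let i := bk.headD 0
      let st := (pvGetL ig i).foldl (pvStepB key) (pvSetL buckets p1 bk.tail, iin, p1)
      pvDrainB ig key kk fuel st.1 st.2.1 (res ++ [i]) st.2.2
    else res

def doit_topsort_alt (n : Int) (m : Int) (group : List Int) (beforeItems : List (List Int)) : List Int :=
  let P := pvPrep n m group beforeItems
  let grp := P.1
  let mm := P.2.1
  let ig := P.2.2.1
  let iin := P.2.2.2.1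
  let go := P.2.2.2.2.1
  let kk := P.2.2.2.2.2
  if (go.size : Int) < mm then []
  else
    let key := fun i => go.getD (pvGetI grp i) 0
    let buckets := (PySem.List.pyRange 0 n).foldl (pvSeedB key iin) (List.replicate kk.toNat [])
    let res := pvDrainB ig key kk (n.toNat + pvEdgeCount ig + 1) buckets iin [] 0
    if (res.length : Int) = n then res else []

-- ===== PRECONDITION & SPEC =====
-- Pre_ excludes inputs on which Python A raises (IndexError/KeyError: a before-item index
-- ≥ n, a group id outside [0,m) and ≠ -1, or lists shorter than n), and also negative
-- before-item indices, where Python's negative-index wraparound is an accident of the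
-- implementation (both programs, sharing the build loop verbatim, still return the same
-- value there).  For n ≤ 0 the Python never indexes anything and always returns.
def Pre_doit_topsort (n : Int) (m : Int) (group : List Int) (beforeItems : List (List Int)) : Prop :=
  n ≤ 0 ∨ (0 ≤ m ∧ n ≤ (group.length : Int) ∧ n ≤ (beforeItems.length : Int)
    ∧ (∀ g ∈ group.take n.toNat, g = -1 ∨ (0 ≤ g ∧ g < m))
    ∧ (∀ l ∈ beforeItems.take n.toNat, ∀ c ∈ l, 0 ≤ c ∧ c < n))
instance (n : Int) (m : Int) (group : List Int) (beforeItems : List (List Int)) : Decidable (Pre_doit_topsort n m group beforeItems) := by unfold Pre_doit_topsort; infer_instance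
def pvWitness_doit_topsort : Int × Int × List Int × List (List Int) := (3, 2, [0, 1, -1], [[], [0], [1]])

def Spec_doit_topsort (n : Int) (m : Int) (group : List Int) (beforeItems : List (List Int)) (out : List Int) : Prop := out = doit_topsort_alt n m group beforeItems
instance (n : Int) (m : Int) (group : List Int) (beforeItems : List (List Int)) (out : List Int) : Decidable (Spec_doit_topsort n m group beforeItems out) := by unfold Spec_doit_topsort; infer_instance

-- ===== CLAIM (what is proved, stated in full; the proofs are below) =====
def Claim_equal_doit_topsort : Prop := ∀ (n : Int) (m : Int) (group : List Int) (beforeItems : List (List Int)), Dom_doit_topsort n m group beforeItems → Pre_doit_topsort n m group beforeItems → Spec_doit_topsort n m group beforeItems (doit_topsort n m group beforeItems)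

-- ===== LEMMAS AND PROOFS =====

-- small facts about the indexing helpers
lemma pvGetL_set_self (xs : List (List Int)) (g : Int) (v : List Int)
    (h0 : 0 ≤ g) (h1 : g < (xs.length : Int)) : pvGetL (pvSetL xs g v) g = v := by
  unfold pvGetL pvSetL
  rw [PySem.List.pyGetD_eq_getElem _ _ h0 (by simp; omega)]
  simp

lemma pvGetL_set_ne (xs : List (List Int)) (i g : Int) (v : List Int)
    (hi : 0 ≤ i) (h0 : 0 ≤ g) (h1 : g < (xs.length : Int)) (hne : g ≠ i) :
    pvGetL (pvSetL xs i v) g = pvGetL xs g := by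
  unfold pvGetL pvSetL
  rw [PySem.List.pyGetD_eq_getElem _ _ h0 (by simp; omega),
      PySem.List.pyGetD_eq_getElem _ _ h0 h1]
  rw [List.getElem_set]
  rw [if_neg (by omega)]

lemma pvGetL_replicate (k : Nat) (g : Int) (h0 : 0 ≤ g) (h1 : g < (k : Int)) :
    pvGetL (List.replicate k ([] : List Int)) g = [] := by
  unfold pvGetL
  rw [PySem.List.pyGetD_eq_getElem _ _ h0 (by simp; omega)]
  simp

-- the lexicographic order on heap triples
lemma pvTripLe_refl (a : Int × Int × Int) : pvTripLe a a = true := by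
  simp [pvTripLe]

lemma pvTripLe_of_not {a b : Int × Int × Int} (h : ¬ pvTripLe a b = true) : pvTripLe b a = true := by
  rcases a with ⟨a1, a2, a3⟩; rcases b with ⟨b1, b2, b3⟩
  simp [pvTripLe] at *; omega

lemma pvTripLe_trans {a b c : Int × Int × Int}
    (h1 : pvTripLe a b = true) (h2 : pvTripLe b c = true) : pvTripLe a c = true := by
  rcases a with ⟨a1, a2, a3⟩; rcases b with ⟨b1, b2, b3⟩; rcases c with ⟨c1, c2, c3⟩
  simp [pvTripLe] at *; omega

lemma pvTripLe_ne_of_not {a b : Int × Int × Int} (h : ¬ pvTripLe a b = true) : a ≠ b := by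
  intro he; subst he; exact h (pvTripLe_refl a)

-- pvHeapPop returns the least element and the list with its (unique) occurrence removed
lemma pvHeapPop_spec (u : Int × Int × Int) (h : List (Int × Int × Int)) :
    (pvHeapPop (u :: h)).1 ∈ u :: h ∧
    (∀ w ∈ u :: h, pvTripLe (pvHeapPop (u :: h)).1 w = true) ∧
    (pvHeapPop (u :: h)).2 = (u :: h).erase (pvHeapPop (u :: h)).1 := by
  induction h generalizing u with
  | nil =>
    refine ⟨by simp [pvHeapPop], ?_, by simp [pvHeapPop]⟩
    intro w hw
    simp at hw; subst hw; simp [pvHeapPop, pvTripLe_refl]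
  | cons v t ih =>
    obtain ⟨hmem, hmin, hrest⟩ := ih v
    by_cases hc : pvTripLe u (pvHeapPop (v :: t)).1 = true
    · simp only [pvHeapPop, hc, if_pos]
      refine ⟨List.mem_cons_self, ?_, (List.erase_cons_head u (v :: t)).symm⟩
      intro w hw
      rcases List.mem_cons.mp hw with hw | hw
      · subst hw; exact pvTripLe_refl _
      · exact pvTripLe_trans hc (hmin w hw)
    · simp only [pvHeapPop, hc, if_neg, Bool.false_eq_true, not_false_eq_true]
      refine ⟨List.mem_cons_of_mem _ hmem, ?_, ?_⟩
      · intro w hw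
        rcases List.mem_cons.mp hw with hw | hw
        · subst hw; exact pvTripLe_of_not hc
        · exact hmin w hw
      · rw [List.erase_cons_tail (by simpa using pvTripLe_ne_of_not hc)]
        rw [hrest]

-- removing an element the predicate rejects does not change a filter
lemma filter_erase_of_pred_false {P : (Int × Int × Int) → Bool} {t : Int × Int × Int}
    (hP : P t = false) :
    ∀ h : List (Int × Int × Int), (h.erase t).filter P = h.filter P := by
  intro h; induction h with
  | nil => simp
  | cons x rest ih =>
    by_cases hx : x = t
    · subst hx; rw [List.erase_cons_head]
      simp [hP]
    · rw [List.erase_cons_tail (by simpa using hx)]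
      simp only [List.filter_cons, ih]

-- the least triple heads the filter of its own key (ord components strictly increase)
def pvOrdLt (a b : Int × Int × Int) : Prop := a.2.1 < b.2.1

lemma filter_min_head :
    ∀ (h : List (Int × Int × Int)) (t : Int × Int × Int), t ∈ h →
    List.Pairwise pvOrdLt h → (∀ u ∈ h, pvTripLe t u = true) →
    h.filter (fun u => decide (u.1 = t.1)) =
      t :: (h.erase t).filter (fun u => decide (u.1 = t.1)) := by
  intro h
  induction h with
  | nil => intro t ht; simp at ht
  | cons x rest ih =>
    intro t hmem hpw hmin
    by_cases hx : x = t
    · subst hx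
      rw [List.erase_cons_head]
      simp
    · have htr : t ∈ rest := by
        rcases List.mem_cons.mp hmem with h' | h'
        · exact absurd h'.symm hx
        · exact h'
      have hlt : pvOrdLt x t := (List.pairwise_cons.mp hpw).1 t htr
      have hxkey : ¬ (x.1 = t.1) := by
        intro he
        have hm := hmin x List.mem_cons_self
        rcases x with ⟨x1, x2, x3⟩; rcases t with ⟨t1, t2, t3⟩
        simp [pvTripLe] at hm
        unfold pvOrdLt at hlt
        simp at he hlt
        omega
      rw [List.erase_cons_tail (by simpa using hx)]
      simp only [List.filter_cons, decide_eq_true_eq, if_neg hxkey]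
      exact ih t htr (List.pairwise_cons.mp hpw).2
        (fun u hu => hmin u (List.mem_cons_of_mem _ hu))

-- pvAdvance: characterisations
lemma pvAdvance_all_empty (buckets : List (List Int)) (kk : Int) :
    ∀ p, p ≤ kk → (∀ g, p ≤ g → g < kk → pvGetL buckets g = []) →
    pvAdvance buckets kk p = kk := by
  intro p
  generalize hk : (kk - p).toNat = k
  induction k generalizing p with
  | zero =>
    intro hp _
    rw [pvAdvance, dif_neg (by omega)]
    omega
  | succ k ihk =>
    intro hp hemp
    have hpk : p < kk := by omega
    rw [pvAdvance, dif_pos hpk, if_pos (hemp p le_rfl hpk)]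
    exact ihk (p + 1) (by omega) (by omega) (fun g h1 h2 => hemp g (by omega) h2)

lemma pvAdvance_eq_of (buckets : List (List Int)) (kk : Int) :
    ∀ p q, p ≤ q → q < kk → (∀ g, p ≤ g → g < q → pvGetL buckets g = []) →
    pvGetL buckets q ≠ [] → pvAdvance buckets kk p = q := by
  intro p q
  generalize hk : (q - p).toNat = k
  induction k generalizing p with
  | zero =>
    intro hpq hq hemp hne
    have hpq' : p = q := by omega
    subst hpq'
    rw [pvAdvance, dif_pos (by omega), if_neg hne]
  | succ k ihk =>
    intro hpq hq hemp hne
    have hlt : p < q := by omega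
    rw [pvAdvance, dif_pos (by omega), if_pos (hemp p le_rfl hlt)]
    exact ihk (p + 1) (by omega) (by omega) hq (fun g h1 h2 => hemp g (by omega) h2) hne

-- the bisimulation invariant between A's heap and B's buckets
def BInv (K : Int) (h : List (Int × Int × Int)) (ord : Int)
    (buckets : List (List Int)) (p : Int) : Prop :=
  buckets.length = K.toNat ∧
  List.Pairwise pvOrdLt h ∧
  (∀ t ∈ h, t.2.1 < ord) ∧
  (∀ t ∈ h, 0 ≤ t.1 ∧ t.1 < K) ∧
  (∀ g : Int, 0 ≤ g → g < K →
    pvGetL buckets g = (h.filter (fun t => decide (t.1 = g))).map (fun t => t.2.2)) ∧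
  0 ≤ p ∧ p ≤ K ∧ (∀ g : Int, 0 ≤ g → g < p → pvGetL buckets g = [])

lemma push_inv {K : Int} {h : List (Int × Int × Int)} {ord : Int}
    {buckets : List (List Int)} {p : Int} (kj j : Int)
    (hk0 : 0 ≤ kj) (hk1 : kj < K) (I : BInv K h ord buckets p) :
    BInv K (h ++ [(kj, ord, j)]) (ord + 1)
      (pvSetL buckets kj (pvGetL buckets kj ++ [j])) (if kj < p then kj else p) := by
  obtain ⟨hlen, hpw, hord, hkr, hcor, hp0, hpK, hemp⟩ := I
  have hblen : kj < (buckets.length : Int) := by rw [hlen]; omega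
  refine ⟨by simp [pvSetL, hlen], ?_, ?_, ?_, ?_, ?_, ?_, ?_⟩
  · rw [List.pairwise_append]
    refine ⟨hpw, by simp, ?_⟩
    intro a ha b hb
    simp at hb; subst hb
    exact hord a ha
  · intro t ht
    rcases List.mem_append.mp ht with ht | ht
    · have := hord t ht; omega
    · simp at ht; subst ht; simp
  · intro t ht
    rcases List.mem_append.mp ht with ht | ht
    · exact hkr t ht
    · simp at ht; subst ht; exact ⟨hk0, hk1⟩
  · intro g hg0 hgK
    by_cases hgkj : g = kj
    · subst hgkj
      rw [pvGetL_set_self _ _ _ hg0 hblen, hcor g hg0 hgK, List.filter_append]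
      simp
    · rw [pvGetL_set_ne _ _ _ _ hk0 hg0 (by rw [hlen]; omega) hgkj,
          hcor g hg0 hgK, List.filter_append]
      have : decide (((kj, ord, j) : Int × Int × Int).1 = g) = false := by
        simp; omega
      simp [this]
  · split <;> omega
  · split <;> omega
  · intro g hg0 hgp
    by_cases hc : kj < p
    · rw [if_pos hc] at hgp
      rw [pvGetL_set_ne _ _ _ _ hk0 hg0 (by rw [hlen]; omega) (by omega)]
      exact hemp g hg0 (by omega)
    · rw [if_neg hc] at hgp
      rw [pvGetL_set_ne _ _ _ _ hk0 hg0 (by rw [hlen]; omega) (by omega)]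
      exact hemp g hg0 hgp

lemma pop_inv {K : Int} {h : List (Int × Int × Int)} {ord : Int}
    {buckets : List (List Int)} {p : Int} (I : BInv K h ord buckets p)
    (a : Int × Int × Int) (hs : List (Int × Int × Int)) (hh : h = a :: hs) :
    (pvHeapPop h).1.1 < K ∧
    pvAdvance buckets K p = (pvHeapPop h).1.1 ∧
    pvGetL buckets (pvHeapPop h).1.1 =
      (pvHeapPop h).1.2.2 ::
        ((h.erase (pvHeapPop h).1).filter
          (fun u => decide (u.1 = (pvHeapPop h).1.1))).map (fun u => u.2.2) ∧
    BInv K (h.erase (pvHeapPop h).1) ord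
      (pvSetL buckets (pvHeapPop h).1.1 (pvGetL buckets (pvHeapPop h).1.1).tail)
      (pvHeapPop h).1.1 := by
  obtain ⟨hlen, hpw, hord, hkr, hcor, hp0, hpK, hemp⟩ := I
  subst hh
  obtain ⟨hmem, hmin, hrest⟩ := pvHeapPop_spec a hs
  set t := (pvHeapPop (a :: hs)).1 with hT
  have hkey := hkr t hmem
  have hfilt : (a :: hs).filter (fun u => decide (u.1 = t.1)) =
      t :: ((a :: hs).erase t).filter (fun u => decide (u.1 = t.1)) :=
    filter_min_head (a :: hs) t hmem hpw hmin
  have hbkt : pvGetL buckets t.1 =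
      t.2.2 :: (((a :: hs).erase t).filter (fun u => decide (u.1 = t.1))).map (fun u => u.2.2) := by
    rw [hcor t.1 hkey.1 hkey.2, hfilt]; simp
  -- buckets strictly between p and t.1 are empty
  have hmid : ∀ g, p ≤ g → g < t.1 → pvGetL buckets g = [] := by
    intro g hg1 hg2
    rw [hcor g (by omega) (by omega)]
    have : (a :: hs).filter (fun u => decide (u.1 = g)) = [] := by
      rw [List.filter_eq_nil_iff]
      intro w hw hwg
      have hm := hmin w hw
      rcases w with ⟨w1, w2, w3⟩; rcases t with ⟨t1, t2, t3⟩
      simp at hwg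
      simp [pvTripLe] at hm
      omega
    rw [this]; simp
  have hple : p ≤ t.1 := by
    by_contra hc
    have := hemp t.1 hkey.1 (by omega)
    rw [hbkt] at this
    exact List.cons_ne_nil _ _ this
  have hadv : pvAdvance buckets K p = t.1 :=
    pvAdvance_eq_of buckets K p t.1 hple hkey.2 hmid (by rw [hbkt]; exact List.cons_ne_nil _ _)
  refine ⟨hkey.2, hadv, hbkt, ?_⟩
  have hblen : t.1 < (buckets.length : Int) := by rw [hlen]; omega
  refine ⟨by simp [pvSetL, hlen], hpw.sublist (List.erase_sublist),
    fun w hw => hord w (List.mem_of_mem_erase hw),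
    fun w hw => hkr w (List.mem_of_mem_erase hw), ?_, hkey.1, by omega, ?_⟩
  · intro g hg0 hgK
    by_cases hgt : g = t.1
    · subst hgt
      rw [pvGetL_set_self _ _ _ hg0 hblen, hbkt]
      simp
    · rw [pvGetL_set_ne _ _ _ _ hkey.1 hg0 (by rw [hlen]; omega) hgt,
          hcor g hg0 hgK]
      rw [filter_erase_of_pred_false (by simp; omega)]
  · intro g hg0 hgt
    rw [pvGetL_set_ne _ _ _ _ hkey.1 hg0 (by rw [hlen]; omega) (by omega)]
    by_cases hgp : g < p
    · exact hemp g hg0 hgp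
    · exact hmid g (by omega) hgt

-- the two inner push loops stay in lockstep
lemma fold_step_eq {K : Int} (key : Int → Int) (hkey : ∀ j, 0 ≤ key j ∧ key j < K) :
    ∀ (nbrs : List Int) (h : List (Int × Int × Int)) (ord : Int)
      (buckets : List (List Int)) (p : Int) (iin : List Int),
    BInv K h ord buckets p →
    (nbrs.foldl (pvStepA key) (h, iin, ord)).2.1 =
      (nbrs.foldl (pvStepB key) (buckets, iin, p)).2.1 ∧
    BInv K (nbrs.foldl (pvStepA key) (h, iin, ord)).1
      (nbrs.foldl (pvStepA key) (h, iin, ord)).2.2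
      (nbrs.foldl (pvStepB key) (buckets, iin, p)).1
      (nbrs.foldl (pvStepB key) (buckets, iin, p)).2.2 := by
  intro nbrs
  induction nbrs with
  | nil => intro h ord buckets p iin I; exact ⟨rfl, I⟩
  | cons nc rest ih =>
    intro h ord buckets p iin I
    simp only [List.foldl_cons]
    by_cases hc : pvGetI (pvSetI iin nc (pvGetI iin nc - 1)) nc = 0
    · simp only [pvStepA, pvStepB, if_pos hc]
      exact ih _ _ _ _ _ (push_inv (key nc) nc (hkey nc).1 (hkey nc).2 I)
    · simp only [pvStepA, pvStepB, if_neg hc]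
      exact ih _ _ _ _ _ I

-- the two seeding loops stay in lockstep
lemma seed_inv {K : Int} (key : Int → Int) (hkey : ∀ j, 0 ≤ key j ∧ key j < K) (iinc : List Int) :
    ∀ (l : List Int) (h : List (Int × Int × Int)) (ord : Int) (buckets : List (List Int)),
    BInv K h ord buckets 0 →
    BInv K (l.foldl (pvSeedA key iinc) (h, ord)).1 (l.foldl (pvSeedA key iinc) (h, ord)).2
      (l.foldl (pvSeedB key iinc) buckets) 0 := by
  intro l
  induction l with
  | nil => intro h ord buckets I; exact I
  | cons i rest ih =>
    intro h ord buckets I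
    simp only [List.foldl_cons]
    by_cases hc : pvGetI iinc i = 0
    · simp only [pvSeedA, pvSeedB, if_pos hc]
      have := push_inv (key i) i (hkey i).1 (hkey i).2 I
      rw [if_neg (not_lt.mpr (hkey i).1)] at this
      exact ih _ _ _ this
    · simp only [pvSeedA, pvSeedB, if_neg hc]
      exact ih _ _ _ I

-- the main bisimulation: heap drain = bucket drain
lemma drain_eq {K : Int} (ig : List (List Int)) (key : Int → Int)
    (hkey : ∀ j, 0 ≤ key j ∧ key j < K) :
    ∀ (fuel : Nat) (h : List (Int × Int × Int)) (iin res : List Int) (ord : Int)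
      (buckets : List (List Int)) (p : Int),
    BInv K h ord buckets p →
    pvDrainA ig key fuel h iin res ord = pvDrainB ig key K fuel buckets iin res p := by
  intro fuel
  induction fuel with
  | zero => intros; rfl
  | succ fl ih =>
    intro h iin res ord buckets p I
    cases h with
    | nil =>
      obtain ⟨hlen, hpw, hord, hkr, hcor, hp0, hpK, hemp⟩ := I
      have hall : ∀ g, p ≤ g → g < K → pvGetL buckets g = [] := by
        intro g h1 h2
        rw [hcor g (by omega) h2]; simp
      simp only [pvDrainA, pvDrainB]
      rw [pvAdvance_all_empty buckets K p hpK hall, if_neg (lt_irrefl K)]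
    | cons a hs =>
      obtain ⟨htK, hadv, hbk, I'⟩ := pop_inv I a hs rfl
      have hrest := (pvHeapPop_spec a hs).2.2
      simp only [pvDrainA, pvDrainB]
      rw [hadv, if_pos htK, hbk]
      simp only [List.headD_cons, List.tail_cons]
      rw [hbk] at I'
      simp only [List.tail_cons] at I'
      rw [hrest]
      obtain ⟨hiin, I2⟩ :=
        fold_step_eq key hkey (pvGetL ig ((pvHeapPop (a :: hs)).1.2.2)) _ _ _ _ iin I'
      rw [hiin]
      exact ih _ _ _ _ _ _ I2

lemma BInv_init {K : Int} (hK : 0 ≤ K) : BInv K [] 0 (List.replicate K.toNat []) 0 := by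
  refine ⟨by simp, by simp, by simp, by simp, ?_, le_rfl, hK, by intro g h0 h1; omega⟩
  intro g h0 h1
  rw [pvGetL_replicate _ _ h0 (by omega)]
  simp

-- Kahn pass: the assigned ranks are nonnegative and below the final counter,
-- and the dictionary never has more entries than ranks were handed out
lemma dict_size_insert_le (d : PySem.Dict Int Int) (k v : Int) :
    (d.insert k v).size ≤ d.size + 1 := by
  unfold PySem.Dict.insert PySem.Dict.size
  split <;> simp

lemma kahn_bounds (gg : List (List Int)) :
    ∀ (fuel : Nat) (q : List Int) (go : PySem.Dict Int Int) (ord : Int) (gin : List Int),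
    0 ≤ ord → (go.size : Int) ≤ ord →
    (∀ k v, go.get? k = some v → 0 ≤ v ∧ v < ord) →
    0 ≤ (pvKahn gg fuel q go ord gin).2 ∧
    ((pvKahn gg fuel q go ord gin).1.size : Int) ≤ (pvKahn gg fuel q go ord gin).2 ∧
    (∀ k v, (pvKahn gg fuel q go ord gin).1.get? k = some v →
      0 ≤ v ∧ v < (pvKahn gg fuel q go ord gin).2) := by
  intro fuel
  induction fuel with
  | zero => intro q go ord gin h0 hsz hv; exact ⟨h0, hsz, hv⟩
  | succ fl ih =>
    intro q go ord gin h0 hsz hv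
    cases q with
    | nil => exact ⟨h0, hsz, hv⟩
    | cons c q' =>
      simp only [pvKahn]
      apply ih
      · omega
      · have := dict_size_insert_le go c ord
        omega
      · intro k v hk
        by_cases hkc : k = c
        · subst hkc
          rw [PySem.Dict.get?_insert_self] at hk
          cases hk
          omega
        · rw [PySem.Dict.get?_insert_of_ne _ _ hkc] at hk
          have := hv k v hk
          omega

-- the remapped group count
lemma pvRemap_ge (l : List Int) : ∀ m : Int, m ≤ (pvRemap l m).2 := by
  induction l with
  | nil => intro m; simp [pvRemap]
  | cons g t ih =>
    intro m
    by_cases hg : g = -1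
    · simp only [pvRemap, if_pos hg]
      have := ih (m + 1)
      omega
    · simp only [pvRemap, if_neg hg]
      exact ih m

lemma pvRemap_one {g : Int} (t : List Int) {m : Int} (hm : 0 ≤ m)
    (hg : g = -1 ∨ (0 ≤ g ∧ g < m)) : 1 ≤ (pvRemap (g :: t) m).2 := by
  by_cases hg1 : g = -1
  · simp only [pvRemap, if_pos hg1]
    have := pvRemap_ge t (m + 1)
    omega
  · simp only [pvRemap, if_neg hg1]
    have := pvRemap_ge t m
    rcases hg with hg | hg
    · exact absurd hg hg1
    · omega

-- the whole post-preprocessing computation agrees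
lemma main_eq (n : Int) (grp : List Int) (mm : Int) (ig : List (List Int)) (iin : List Int)
    (go : PySem.Dict Int Int) (kk : Int)
    (hkk0 : 0 ≤ kk) (hsz : (go.size : Int) ≤ kk)
    (hvals : ∀ k v, go.get? k = some v → 0 ≤ v ∧ v < kk)
    (hmm1 : 1 ≤ n → 1 ≤ mm) :
    (if (go.size : Int) < mm then ([] : List Int)
     else
       let key := fun i => go.getD (pvGetI grp i) 0
       let seed := (PySem.List.pyRange 0 n).foldl (pvSeedA key iin) ([], 0)
       let res := pvDrainA ig key (n.toNat + pvEdgeCount ig + 1) seed.1 iin [] seed.2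
       if (res.length : Int) = n then res else []) =
    (if (go.size : Int) < mm then ([] : List Int)
     else
       let key := fun i => go.getD (pvGetI grp i) 0
       let buckets := (PySem.List.pyRange 0 n).foldl (pvSeedB key iin) (List.replicate kk.toNat [])
       let res := pvDrainB ig key kk (n.toNat + pvEdgeCount ig + 1) buckets iin [] 0
       if (res.length : Int) = n then res else []) := by
  by_cases hlt : (go.size : Int) < mm
  · rw [if_pos hlt, if_pos hlt]
  · rw [if_neg hlt, if_neg hlt]
    by_cases hK : 0 < kk
    · have hkey : ∀ j : Int, 0 ≤ (fun i => go.getD (pvGetI grp i) 0) j ∧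
          (fun i => go.getD (pvGetI grp i) 0) j < kk := by
        intro j
        simp only
        unfold PySem.Dict.getD
        cases hc : go.get? (pvGetI grp j) with
        | none => simp only [Option.getD_none]; exact ⟨le_rfl, hK⟩
        | some v => simp only [Option.getD_some]; exact hvals _ v hc
      have hseed := seed_inv (K := kk) _ hkey iin (PySem.List.pyRange 0 n) [] 0
        (List.replicate kk.toNat []) (BInv_init hkk0)
      have hdr := drain_eq ig _ hkey (n.toNat + pvEdgeCount ig + 1) _ iin [] _ _ _ hseed
      simp only [hdr]
    · -- kk = 0 forces n ≤ 0: nothing is ever scheduled on either side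
      have hkk : kk = 0 := by omega
      have hn : n ≤ 0 := by
        by_contra hn
        have h1 := hmm1 (by omega)
        omega
      have hr : PySem.List.pyRange 0 n = [] := by
        rw [List.eq_nil_iff_forall_not_mem]
        intro x hx
        have := PySem.List.mem_pyRange_one.mp hx
        omega
      rw [hr, hkk]
      simp only [List.foldl_nil, Int.toNat_zero, List.replicate_zero]
      have hA : pvDrainA ig (fun i => go.getD (pvGetI grp i) 0)
          (n.toNat + pvEdgeCount ig + 1) [] iin [] 0 = [] := by
        simp only [pvDrainA]
      have hB : pvDrainB ig (fun i => go.getD (pvGetI grp i) 0) 0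
          (n.toNat + pvEdgeCount ig + 1) [] iin [] 0 = [] := by
        simp only [pvDrainB]
        rw [pvAdvance, dif_neg (by omega), if_neg (by omega)]
      rw [hA, hB]

-- ===== VERDICT (by name: the statement is the Claim_ definition above) =====
theorem doit_topsort_spec : Claim_equal_doit_topsort := by
  intro n m group bi hdom hpre
  unfold Spec_doit_topsort
  obtain ⟨hkk0, hsz, hvals⟩ :=
    kahn_bounds (pvBuild n (pvRemap group m).1 bi (pvRemap group m).2).2.2.1
      ((pvRemap group m).2.toNat +
        pvEdgeCount (pvBuild n (pvRemap group m).1 bi (pvRemap group m).2).2.2.1 + 1)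
      ((PySem.List.pyRange 0 (pvRemap group m).2).filter
        (fun g => decide (pvGetI (pvBuild n (pvRemap group m).1 bi (pvRemap group m).2).2.2.2 g = 0)))
      PySem.Dict.empty 0
      (pvBuild n (pvRemap group m).1 bi (pvRemap group m).2).2.2.2
      le_rfl (by simp [PySem.Dict.size, PySem.Dict.empty])
      (by intro k v hk; simp [PySem.Dict.get?, PySem.Dict.empty] at hk)
  have hmm1 : 1 ≤ n → 1 ≤ (pvRemap group m).2 := by
    intro hn
    rcases hpre with hle | ⟨hm, hlg, hlb, hgv, hbv⟩
    · omega
    · cases hgrp : group with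
      | nil => rw [hgrp] at hlg; simp at hlg; omega
      | cons g t =>
        apply pvRemap_one t hm
        apply hgv
        rw [hgrp]
        have hk : n.toNat = (n.toNat - 1) + 1 := by omega
        rw [hk, List.take_succ_cons]
        exact List.mem_cons_self
  exact main_eq n (pvRemap group m).1 (pvRemap group m).2
    (pvBuild n (pvRemap group m).1 bi (pvRemap group m).2).1
    (pvBuild n (pvRemap group m).1 bi (pvRemap group m).2).2.1
    _ _ hkk0 hsz hvals hmm1
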